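-- pv_equiv track=rewrite | github.com/ddeng00/neural_analysis | neural_analysis/utils.py | remove_patsy_subterms
-- ===== SOURCE A (Python) =====
-- from itertools import chain, combinations, groupby
-- from collections.abc import Iterable
--
-- def remove_patsy_subterms(terms: list[str]) -> list[str]:
--     """
--     Remove subterms from a list of Patsy terms.
--
--     Parameters
--     ----------
--     terms : list of str
--         List of Patsy terms to be processed.
--
--     Returns
--     -------
--     list of str
--         List of Patsy terms with subterms removed.
--     """
--
--     rem_terms, final_terms = list(terms), []
--     while len(rem_terms) > 0:
--         term = rem_terms[-1]
--         final_terms.append(term)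
--         subterms = [":".join(subterm) for subterm in powerset(term.split(":"))]
--         rem_terms = [t for t in rem_terms if t not in subterms]
--     return final_terms[::-1]
--
-- def powerset(iterable: Iterable) -> Iterable:
--     "powerset([1,2,3]) --> () (1,) (2,) (3,) (1,2) (1,3) (2,3) (1,2,3)"
--     s = list(iterable)
--     return chain.from_iterable(combinations(s, r) for r in range(len(s) + 1))
-- ===== SOURCE B (Python) =====
-- def _is_subseq(a: list[str], b: list[str]) -> bool:
--     """True iff a is an (ordered) subsequence of b."""
--     it = iter(b)
--     return all(c in it for c in a)
--
--
-- def remove_patsy_subterms(terms: list[str]) -> list[str]: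
--     """
--     Remove subterms from a list of Patsy terms.
--
--     A term is dropped iff some LATER term has it as a subterm (its ':'-join of
--     an ordered component subsequence).  Compute, per DISTINCT term t, theta(t) =
--     the last position of a term that t is a subterm of; then keep terms[i] iff
--     theta(terms[i]) <= i.  A proper subterm has strictly fewer components, so
--     after deduplication by a last-occurrence dict, subsequence tests are needed
--     only across different component counts (equal-component terms are equal).
--     """
--     n = len(terms)
--     last = {}                      # distinct term -> its last position
--     for i, t in enumerate(terms):
--         last[t] = i
--     comps = {t: t.split(":") for t in last}
--     by_len = {}                    # component count -> distinct terms with it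
--     for u in last:
--         by_len.setdefault(len(comps[u]), []).append(u)
--     theta = {}
--     for t in last:
--         ct = comps[t]
--         # "" (the join of the empty subsequence) is a subterm of every term
--         th = n - 1 if t == "" else last[t]
--         for l, us in by_len.items():
--             if l > len(ct):
--                 for u in us:
--                     if last[u] > th and _is_subseq(ct, comps[u]):
--                         th = last[u]
--         theta[t] = th
--     return [t for i, t in enumerate(terms) if theta[t] <= i]
-- ===== Notes on version B (the rewrite author's own statement) =====
-- stated objective: faster
-- what changed: B replaces A's pop-from-the-end while loop (powerset of each kept term plus a full re-filter of the remaining list per kept term) by a last-occurrence dict over the distinct terms, a grouping of the distinct terms by component count, a per-distinct-term computation of the last position of a term it is a subterm of (ordered-subsequence tests run only across different component counts, since equal component lists mean equal terms), and one final pass keeping terms[i] iff that position is <= i.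
import Mathlib
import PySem

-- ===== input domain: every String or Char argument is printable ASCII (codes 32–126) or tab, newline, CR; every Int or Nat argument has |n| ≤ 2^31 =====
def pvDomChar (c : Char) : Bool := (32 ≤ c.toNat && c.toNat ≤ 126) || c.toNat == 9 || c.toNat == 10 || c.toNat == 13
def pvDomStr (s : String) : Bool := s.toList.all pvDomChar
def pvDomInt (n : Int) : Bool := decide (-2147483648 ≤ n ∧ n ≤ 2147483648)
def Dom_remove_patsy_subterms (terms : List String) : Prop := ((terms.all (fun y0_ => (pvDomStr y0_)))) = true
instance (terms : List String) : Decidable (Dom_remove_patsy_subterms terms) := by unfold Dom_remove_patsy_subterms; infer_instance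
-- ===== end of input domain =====

-- B drops A's pop-from-the-end while loop with powerset generation and repeated list
-- re-filtering: it deduplicates the terms into a last-occurrence dict, groups the distinct
-- terms by component count, computes per distinct term the last position of a term it is a
-- subterm of (ordered-subsequence tests across different component counts only), and keeps
-- terms[i] iff that position is <= i; objective: faster, same return value on every input.

-- shared helper: term.split(":")  (Python str.split with a non-empty separator never raises)
def splitColon (s : String) : List String := (PySem.Str.split? s ":").getD []

-- ===== PORT A =====
-- helper of A: powerset(iterable) = chain over r in range(len(s)+1) of combinations(s, r)
def powersetA (s : List String) : List (List String) :=
  (List.range (s.length + 1)).flatMap (fun r => PySem.List.combinations s r)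

-- helper of A: [":".join(subterm) for subterm in powerset(term.split(":"))]
def subtermsOf (term : String) : List String :=
  (powersetA (splitColon term)).map (fun sub => PySem.Str.join ":" sub)

-- Support for the termination proof of A's while loop (the popped term is itself a
-- member of its own subterm list, so each filter pass strictly shrinks rem_terms).
-- mySplit is a clean structural model of PySem.Chars.splitOn with separator ":".
def mySplit : List Char → List (List Char)
  | [] => [[]]
  | c :: rest =>
    if c = ':' then [] :: mySplit rest
    else match mySplit rest with
      | [] => [[c]]
      | p :: ps => (c :: p) :: ps

def consHead (pre : List Char) : List (List Char) → List (List Char)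
  | [] => [pre]
  | p :: ps => (pre ++ p) :: ps

theorem mySplit_ne_nil (l : List Char) : mySplit l ≠ [] := by
  cases l with
  | nil => simp [mySplit]
  | cons c rest =>
    simp only [mySplit]
    split
    · simp
    · split <;> simp

theorem consHead_nil_of_ne (t : List (List Char)) (h : t ≠ []) : consHead [] t = t := by
  cases t with
  | nil => exact absurd rfl h
  | cons p ps => simp [consHead]

theorem go_spec (l : List Char) : ∀ (fuel : Nat) (cur : List Char) (acc : List (List Char)),
    l.length < fuel →
    PySem.Chars.splitOn.go [':'] fuel l cur acc = acc.reverse ++ consHead cur.reverse (mySplit l) := by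
  induction l with
  | nil =>
    intro fuel cur acc hf
    match fuel with
    | f + 1 => simp [PySem.Chars.splitOn.go, mySplit, consHead]
  | cons c rest ih =>
    intro fuel cur acc hf
    match fuel with
    | f + 1 =>
      have hrest : rest.length < f := by simp at hf; omega
      by_cases hc : c = ':'
      · subst hc
        have : PySem.Chars.splitOn.go [':'] (f+1) (':' :: rest) cur acc
            = PySem.Chars.splitOn.go [':'] f rest [] (cur.reverse :: acc) := by
          simp [PySem.Chars.splitOn.go, List.isPrefixOf]
        rw [this, ih f [] (cur.reverse :: acc) hrest]
        simp only [List.reverse_nil, consHead_nil_of_ne _ (mySplit_ne_nil rest)]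
        simp [mySplit, consHead]
      · have : PySem.Chars.splitOn.go [':'] (f+1) (c :: rest) cur acc
            = PySem.Chars.splitOn.go [':'] f rest (c :: cur) acc := by
          simp [PySem.Chars.splitOn.go, List.isPrefixOf]
          intro h; exact absurd h.symm hc
        rw [this, ih f (c :: cur) acc hrest]
        obtain ⟨p, ps, hps⟩ : ∃ p ps, mySplit rest = p :: ps := by
          cases h : mySplit rest with
          | nil => exact absurd h (mySplit_ne_nil rest)
          | cons p ps => exact ⟨p, ps, rfl⟩
        simp [mySplit, hc, hps, consHead]

theorem splitOn_eq_mySplit (l : List Char) : PySem.Chars.splitOn l [':'] = mySplit l := by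
  show PySem.Chars.splitOn.go [':'] (l.length + 1) l [] [] = mySplit l
  rw [go_spec l (l.length + 1) [] [] (by omega)]
  simp [consHead_nil_of_ne _ (mySplit_ne_nil l)]

theorem intercalate_cons_head (s p : List Char) (c : Char) (ps : List (List Char)) :
    List.intercalate s ((c :: p) :: ps) = c :: List.intercalate s (p :: ps) := by
  cases ps with
  | nil => simp [List.intercalate]
  | cons q ts => simp [List.intercalate, List.intersperse]

theorem join_mySplit (l : List Char) : PySem.Chars.join [':'] (mySplit l) = l := by
  induction l with
  | nil => simp [mySplit, PySem.Chars.join, List.intercalate]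
  | cons c rest ih =>
    by_cases hc : c = ':'
    · subst hc
      obtain ⟨p, ps, hps⟩ : ∃ p ps, mySplit rest = p :: ps := by
        cases h : mySplit rest with
        | nil => exact absurd h (mySplit_ne_nil rest)
        | cons p ps => exact ⟨p, ps, rfl⟩
      rw [show mySplit (':' :: rest) = [] :: mySplit rest from by simp [mySplit], hps]
      have : List.intercalate [':'] ([] :: p :: ps) = [] ++ [':'] ++ List.intercalate [':'] (p :: ps) := by
        simp [List.intercalate, List.intersperse]
      simp only [PySem.Chars.join] at ih ⊢
      rw [this]
      rw [hps] at ih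
      simp [ih]
    · obtain ⟨p, ps, hps⟩ : ∃ p ps, mySplit rest = p :: ps := by
        cases h : mySplit rest with
        | nil => exact absurd h (mySplit_ne_nil rest)
        | cons p ps => exact ⟨p, ps, rfl⟩
      simp only [mySplit, if_neg hc, hps]
      simp only [PySem.Chars.join] at ih ⊢
      rw [intercalate_cons_head]
      rw [hps] at ih
      rw [ih]

-- Str-level facts about splitColon
theorem splitColon_toList (s : String) :
    (splitColon s).map String.toList = mySplit s.toList := by
  have h := PySem.Str.split?_map s ":"
  have hsep : (":" : String).toList = [':'] := by decide
  rw [hsep] at h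
  have h2 : PySem.Chars.split? s.toList [':'] = some (PySem.Chars.splitOn s.toList [':']) := by
    simp [PySem.Chars.split?]
  rw [h2] at h
  cases hs : PySem.Str.split? s ":" with
  | none => rw [hs] at h; simp at h
  | some parts =>
    rw [hs] at h
    simp only [Option.map_some, Option.some.injEq] at h
    simp [splitColon, hs, h, splitOn_eq_mySplit]

theorem join_splitColon (s : String) : PySem.Str.join ":" (splitColon s) = s := by
  rw [← String.toList_inj, PySem.Str.toList_join, splitColon_toList]
  have hsep : (":" : String).toList = [':'] := by decide
  rw [hsep, join_mySplit]

theorem self_mem_subterms (term : String) : term ∈ subtermsOf term := by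
  have hmem : splitColon term ∈ powersetA (splitColon term) := by
    simp only [powersetA, List.mem_flatMap]
    exact ⟨(splitColon term).length, by simp [List.mem_range],
      by rw [PySem.List.combinations_length_self]; simp⟩
  simpa [subtermsOf, List.mem_map] using ⟨splitColon term, hmem, join_splitColon term⟩

theorem getLastD_mem (rem : List String) (h : rem ≠ []) : rem.getLastD "" ∈ rem := by
  rw [List.getLastD_eq_getLast?, List.getLast?_eq_some_getLast h]
  exact List.getLast_mem h

theorem filterA_len_lt (rem : List String) (h : rem ≠ []) :
    (rem.filter (fun t => !(subtermsOf (rem.getLastD "")).contains t)).length < rem.length := by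
  rw [List.length_filter_lt_length_iff_exists]
  refine ⟨rem.getLastD "", getLastD_mem rem h, ?_⟩
  simp only [Bool.not_eq_true', Bool.not_eq_false]
  exact List.contains_iff_mem.mpr (self_mem_subterms (rem.getLastD ""))

-- A's while loop: term = rem_terms[-1]; final_terms.append(term);
--   rem_terms = [t for t in rem_terms if t not in subterms]
def loopA (rem final : List String) : List String :=
  if h : rem ≠ [] then
    let term := rem.getLastD ""        -- rem_terms[-1] on a non-empty list
    loopA (rem.filter (fun t => !(subtermsOf term).contains t)) (final ++ [term])
  else final
termination_by rem.length
decreasing_by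
  have hlt := filterA_len_lt rem h
  rw [← List.countP_eq_length_filter] at hlt
  simp only [List.length_unattach, ← List.countP_eq_length_filter]
  exact (List.countP_attach (l := rem)
    (p := fun t => !(subtermsOf (rem.getLastD "")).contains t)) ▸ hlt

-- final_terms[::-1] is List.reverse
def remove_patsy_subterms (terms : List String) : List String :=
  (loopA terms []).reverse

-- ===== PORT B =====
-- helper of B: _is_subseq(a, b) — greedy iterator scan 'all(c in it for c in a)'
def isSubseq : List String → List String → Bool
  | [], _ => true
  | _ :: _, [] => false
  | a :: as, b :: bs => if a = b then isSubseq as bs else isSubseq (a :: as) bs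

-- B: last-occurrence dict, per-distinct component lists, grouping by component count,
-- theta[t] = last position of a term t is a subterm of, final filter pass.
-- Lookups comps[t] / last[u] / theta[t] are on present keys, so .getD is exact there.
def remove_patsy_subterms_alt (terms : List String) : List String :=
  let n : Int := (terms.length : Int)
  let last : PySem.Dict String Int :=
    (PySem.List.enumerate terms).foldl (fun d p => d.insert p.2 p.1) PySem.Dict.empty
  let ks := last.keys
  let comps : PySem.Dict String (List String) :=
    ks.foldl (fun d t => d.insert t (splitColon t)) PySem.Dict.empty
  let by_len : PySem.Dict Int (List String) :=
    ks.foldl (fun d u => d.modify ((comps.getD u []).length : Int) [] (· ++ [u]))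
      PySem.Dict.empty
  let theta : PySem.Dict String Int :=
    ks.foldl (fun d t =>
      let ct := comps.getD t []
      let th0 : Int := if t = "" then n - 1 else last.getD t 0
      let th := by_len.items.foldl (fun th pr =>
          if (ct.length : Int) < pr.1 then
            pr.2.foldl (fun th u =>
              if th < last.getD u 0 && isSubseq ct (comps.getD u []) then last.getD u 0
              else th) th
          else th) th0
      d.insert t th) PySem.Dict.empty
  (PySem.List.enumerate terms).filterMap
    (fun p => if theta.getD p.2 0 ≤ p.1 then some p.2 else none)

-- ===== PRECONDITION & SPEC =====
def Spec_remove_patsy_subterms (terms : List String) (out : List String) : Prop := out = remove_patsy_subterms_alt terms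
instance (terms : List String) (out : List String) : Decidable (Spec_remove_patsy_subterms terms out) := by unfold Spec_remove_patsy_subterms; infer_instance

-- ===== CLAIM (what is proved, stated in full; the proofs are below) =====
def Claim_equal_remove_patsy_subterms : Prop := ∀ (terms : List String), Dom_remove_patsy_subterms terms → Spec_remove_patsy_subterms terms (remove_patsy_subterms terms)

-- ===== LEMMAS AND PROOFS =====

-- proof-side subterm test: t is a subterm of u
def isSubterm (t u : String) : Bool := t == "" || isSubseq (splitColon t) (splitColon u)


-- reference scan for A: right-to-left pass keeping t unless it is in the forbidden set F,
-- where F accumulates the subterm lists of the kept terms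
def scanF : List String → List String → List String
  | [], _ => []
  | t :: rest, F => if t ∈ F then scanF rest F else t :: scanF rest (F ++ subtermsOf t)

-- same scan with F represented by the list L of kept terms, tested via isSubterm
def scanH : List String → List String → List String
  | [], _ => []
  | t :: rest, L => if L.any (fun u => isSubterm t u) then scanH rest L else t :: scanH rest (t :: L)

-- same scan but testing against ALL previously processed terms (kept or not)
def scanA : List String → List String → List String
  | [], _ => []
  | t :: rest, L => if L.any (fun u => isSubterm t u) then scanA rest (t :: L) else t :: scanA rest (t :: L)

-- accumulator-free version of B's loop
def keepB : List String → List String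
  | [] => []
  | t :: rest => if rest.any (fun u => isSubterm t u) then keepB rest else t :: keepB rest

-- powerset membership is sublist membership
theorem mem_powersetA (s sub : List String) : sub ∈ powersetA s ↔ sub.Sublist s := by
  simp only [powersetA, List.mem_flatMap, List.mem_range, PySem.List.mem_combinations_iff]
  constructor
  · rintro ⟨r, _, hsub, _⟩; exact hsub
  · intro hsub; exact ⟨sub.length, by have := hsub.length_le; omega, hsub, rfl⟩

-- B's greedy iterator test is exactly the sublist relation
theorem isSubseq_iff : ∀ (a b : List String), isSubseq a b = true ↔ a.Sublist b
  | [], b => by simp [isSubseq]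
  | x :: xs, [] => by simp [isSubseq]
  | x :: xs, y :: ys => by
    by_cases h : x = y
    · subst h
      rw [show isSubseq (x :: xs) (x :: ys) = isSubseq xs ys from by simp [isSubseq],
        isSubseq_iff xs ys]
      exact (List.cons_sublist_cons).symm
    · rw [show isSubseq (x :: xs) (y :: ys) = isSubseq (x :: xs) ys from by simp [isSubseq, h],
        isSubseq_iff (x :: xs) ys]
      constructor
      · exact List.Sublist.cons y
      · intro hs
        cases hs with
        | cons _ h2 => exact h2
        | cons₂ => exact absurd rfl h
termination_by a b => a.length + b.length

-- the pieces of a colon-split contain no ':'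
theorem noColon_mySplit (l : List Char) : ∀ p ∈ mySplit l, ':' ∉ p := by
  induction l with
  | nil =>
    intro p hp
    simp [mySplit] at hp
    subst hp; simp
  | cons c rest ih =>
    intro p hp
    by_cases hc : c = ':'
    · subst hc
      have hp' : p = [] ∨ p ∈ mySplit rest := by
        simpa [mySplit] using hp
      rcases hp' with rfl | hp'
      · simp
      · exact ih p hp'
    · obtain ⟨q, qs, hqs⟩ : ∃ q qs, mySplit rest = q :: qs := by
        cases h : mySplit rest with
        | nil => exact absurd h (mySplit_ne_nil rest)
        | cons q qs => exact ⟨q, qs, rfl⟩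
      simp only [mySplit, if_neg hc, hqs, List.mem_cons] at hp
      rcases hp with rfl | hp
      · intro hmem
        rcases List.mem_cons.mp hmem with h1 | h1
        · exact hc h1.symm
        · exact ih q (hqs ▸ List.mem_cons_self) h1
      · exact ih p (hqs ▸ List.mem_cons_of_mem _ hp)

theorem mySplit_singleton (p : List Char) (h : ':' ∉ p) : mySplit p = [p] := by
  induction p with
  | nil => simp [mySplit]
  | cons c p' ih =>
    have hc : c ≠ ':' := fun hcc => h (hcc ▸ List.mem_cons_self)
    have hp' : ':' ∉ p' := fun hm => h (List.mem_cons_of_mem _ hm)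
    simp [mySplit, hc, ih hp']

theorem mySplit_append_colon (p l : List Char) (h : ':' ∉ p) :
    mySplit (p ++ ':' :: l) = p :: mySplit l := by
  induction p with
  | nil => simp [mySplit]
  | cons c p' ih =>
    have hc : c ≠ ':' := fun hcc => h (hcc ▸ List.mem_cons_self)
    have hp' : ':' ∉ p' := fun hm => h (List.mem_cons_of_mem _ hm)
    simp only [List.cons_append, mySplit, if_neg hc, ih hp']

theorem mySplit_join : ∀ (pieces : List (List Char)), pieces ≠ [] →
    (∀ p ∈ pieces, ':' ∉ p) → mySplit (PySem.Chars.join [':'] pieces) = pieces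
  | [], hne, _ => absurd rfl hne
  | [p], _, h => by
    simp only [PySem.Chars.join, List.intercalate]
    simpa using mySplit_singleton p (h p (by simp))
  | p :: q :: ps, _, h => by
    have hj : PySem.Chars.join [':'] (p :: q :: ps)
        = p ++ ':' :: PySem.Chars.join [':'] (q :: ps) := by
      simp [PySem.Chars.join, List.intercalate, List.intersperse]
    rw [hj, mySplit_append_colon p _ (h p (by simp)),
      mySplit_join (q :: ps) (by simp) (fun r hr => h r (List.mem_cons_of_mem _ hr))]

theorem noColon_splitColon (u : String) : ∀ p ∈ splitColon u, ':' ∉ p.toList := by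
  intro p hp
  have hm : p.toList ∈ mySplit u.toList :=
    splitColon_toList u ▸ List.mem_map_of_mem hp
  exact noColon_mySplit _ _ hm

theorem splitColon_ne_nil (s : String) : splitColon s ≠ [] := by
  intro h
  have hm := splitColon_toList s
  rw [h] at hm
  exact mySplit_ne_nil _ hm.symm

theorem splitColon_join (s : List String) (hne : s ≠ [])
    (h : ∀ p ∈ s, ':' ∉ p.toList) : splitColon (PySem.Str.join ":" s) = s := by
  have h1 : (splitColon (PySem.Str.join ":" s)).map String.toList = s.map String.toList := by
    rw [splitColon_toList, PySem.Str.toList_join]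
    have hsep : (":" : String).toList = [':'] := by decide
    rw [hsep]
    refine mySplit_join (s.map String.toList) (by simpa using hne) ?_
    intro p hp
    rcases List.mem_map.mp hp with ⟨q, hq, rfl⟩
    exact h q hq
  exact List.map_injective_iff.mpr (fun a b hab => String.toList_inj.mp hab) h1

theorem eq_empty_of_splitColon (s : String) (h : splitColon s = [""]) : s = "" := by
  have hj := join_splitColon s
  rw [h] at hj
  have h2 : PySem.Str.join ":" [""] = "" := by decide
  rw [h2] at hj
  exact hj.symm

-- A's string-level subterm membership ↔ B's component-level sublist relation
theorem mem_subtermsOf (t u : String) :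
    t ∈ subtermsOf u ↔ t = "" ∨ (splitColon t).Sublist (splitColon u) := by
  simp only [subtermsOf, List.mem_map]
  constructor
  · rintro ⟨sub, hsub, rfl⟩
    rw [mem_powersetA] at hsub
    cases sub with
    | nil => left; decide
    | cons a l =>
      right
      rw [splitColon_join (a :: l) (by simp)
        (fun p hp => noColon_splitColon u p (hsub.subset hp))]
      exact hsub
  · rintro (rfl | hsub)
    · exact ⟨[], (mem_powersetA _ _).mpr (List.nil_sublist _), by decide⟩
    · exact ⟨splitColon t, (mem_powersetA _ _).mpr hsub, join_splitColon t⟩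

theorem isSubterm_iff (t u : String) : isSubterm t u = true ↔ t ∈ subtermsOf u := by
  rw [mem_subtermsOf]
  simp [isSubterm, isSubseq_iff]

theorem isSubterm_refl (t : String) : isSubterm t t = true := by
  rw [isSubterm_iff, mem_subtermsOf]
  exact Or.inr (List.Sublist.refl _)

theorem isSubterm_trans {s t u : String} (h1 : isSubterm s t = true)
    (h2 : isSubterm t u = true) : isSubterm s u = true := by
  rw [isSubterm_iff, mem_subtermsOf] at h1 h2 ⊢
  rcases h1 with rfl | h1
  · exact Or.inl rfl
  rcases h2 with rfl | h2
  · have he : splitColon "" = [""] := by decide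
    rw [he] at h1
    rcases List.sublist_singleton.mp h1 with h | h
    · exact absurd h (splitColon_ne_nil s)
    · exact Or.inl (eq_empty_of_splitColon s h)
  · exact Or.inr (h1.trans h2)

-- scanF with F generated by a list L of kept terms is scanH
theorem scanF_eq_scanH : ∀ (rev F L : List String),
    (∀ x, x ∈ F ↔ ∃ u ∈ L, isSubterm x u = true) → scanF rev F = scanH rev L := by
  intro rev
  induction rev with
  | nil => intro F L _; simp [scanF, scanH]
  | cons t rest ih =>
    intro F L hinv
    have htest : (t ∈ F) ↔ (L.any (fun u => isSubterm t u) = true) := by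
      rw [hinv t, List.any_eq_true]
    by_cases hF : t ∈ F
    · rw [scanF, if_pos hF, scanH, if_pos (htest.mp hF)]
      exact ih F L hinv
    · have hb : L.any (fun u => isSubterm t u) = false := by
        rw [← Bool.not_eq_true]
        exact fun hx => hF (htest.mpr hx)
      rw [scanF, if_neg hF, scanH, hb]
      simp only [Bool.false_eq_true, if_false]
      congr 1
      refine ih (F ++ subtermsOf t) (t :: L) ?_
      intro x
      simp only [List.mem_append, hinv x, List.mem_cons, ← isSubterm_iff x t]
      constructor
      · rintro (⟨u, hu, hsub⟩ | h)
        · exact ⟨u, Or.inr hu, hsub⟩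
        · exact ⟨t, Or.inl rfl, h⟩
      · rintro ⟨u, (rfl | hu), hsub⟩
        · exact Or.inr hsub
        · exact Or.inl ⟨u, hu, hsub⟩

-- comparing against the kept terms only = comparing against all processed terms
theorem scanH_eq_scanA : ∀ (rev Lh La : List String),
    (∀ v ∈ Lh, v ∈ La) → (∀ u ∈ La, ∃ v ∈ Lh, isSubterm u v = true) →
    scanH rev Lh = scanA rev La := by
  intro rev
  induction rev with
  | nil => intro Lh La _ _; simp [scanH, scanA]
  | cons t rest ih =>
    intro Lh La hsub hdom
    have hiff : (La.any (fun u => isSubterm t u) = true)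
        ↔ (Lh.any (fun u => isSubterm t u) = true) := by
      simp only [List.any_eq_true]
      constructor
      · rintro ⟨u, hu, hst⟩
        rcases hdom u hu with ⟨v, hv, huv⟩
        exact ⟨v, hv, isSubterm_trans hst huv⟩
      · rintro ⟨v, hv, hst⟩
        exact ⟨v, hsub v hv, hst⟩
    by_cases h : Lh.any (fun u => isSubterm t u) = true
    · rw [scanH, if_pos h, scanA, if_pos (hiff.mpr h)]
      refine ih Lh (t :: La) (fun v hv => List.mem_cons_of_mem _ (hsub v hv)) ?_
      intro u hu
      rcases List.mem_cons.mp hu with rfl | hu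
      · exact List.any_eq_true.mp h
      · exact hdom u hu
    · have ha : La.any (fun u => isSubterm t u) = false := by
        rw [← Bool.not_eq_true]
        exact fun hx => h (hiff.mp hx)
      have hh : Lh.any (fun u => isSubterm t u) = false := by
        rw [← Bool.not_eq_true]; exact h
      rw [scanH, hh, scanA, ha]
      simp only [Bool.false_eq_true, if_false]
      congr 1
      refine ih (t :: Lh) (t :: La) ?_ ?_
      · intro v hv
        rcases List.mem_cons.mp hv with rfl | hv
        · exact List.mem_cons_self
        · exact List.mem_cons_of_mem _ (hsub v hv)
      · intro u hu
        rcases List.mem_cons.mp hu with rfl | hu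
        · exact ⟨u, List.mem_cons_self, isSubterm_refl u⟩
        · rcases hdom u hu with ⟨v, hv, huv⟩
          exact ⟨v, List.mem_cons_of_mem _ hv, huv⟩

theorem scanA_append : ∀ (xs ys L : List String),
    scanA (xs ++ ys) L = scanA xs L ++ scanA ys (xs.reverse ++ L) := by
  intro xs
  induction xs with
  | nil => intro ys L; simp [scanA]
  | cons x xs ih =>
    intro ys L
    rw [List.cons_append, scanA, scanA]
    have hL : xs.reverse ++ x :: L = (x :: xs).reverse ++ L := by
      simp
    by_cases h : L.any (fun u => isSubterm x u) = true
    · rw [if_pos h, if_pos h, ih ys (x :: L), hL]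
    · have hb : L.any (fun u => isSubterm x u) = false := by
        rw [← Bool.not_eq_true]; exact h
      rw [hb]
      simp only [Bool.false_eq_true, if_false]
      rw [ih ys (x :: L), hL, List.cons_append]

theorem keepB_eq_scanA (terms : List String) :
    keepB terms = (scanA terms.reverse []).reverse := by
  induction terms with
  | nil => simp [keepB, scanA]
  | cons t rest ih =>
    rw [keepB, List.reverse_cons, scanA_append, List.reverse_append]
    have h1 : scanA [t] (rest.reverse.reverse ++ [])
        = if rest.any (fun u => isSubterm t u) then [] else [t] := by
      simp [scanA]
    rw [h1]
    by_cases h : rest.any (fun u => isSubterm t u) = true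
    · rw [if_pos h, if_pos h]
      simpa using ih
    · have hb : rest.any (fun u => isSubterm t u) = false := by
        rw [← Bool.not_eq_true]; exact h
      rw [hb]
      simp only [Bool.false_eq_true, if_false]
      simp [ih]

-- A's loop computes the reference scan: filtering by F then popping the last
-- element is the right-to-left scan over the unreversed list
theorem loopA_eq_scan : ∀ (n : Nat) (rev F final : List String), rev.length ≤ n →
    loopA ((rev.filter (fun t => !F.contains t)).reverse) final = final ++ scanF rev F := by
  intro n
  induction n with
  | zero =>
    intro rev F final hlen
    have : rev = [] := by cases rev with | nil => rfl | cons a l => simp at hlen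
    subst this
    rw [loopA.eq_def]
    simp [scanF]
  | succ m ih =>
    intro rev F final hlen
    cases rev with
    | nil =>
      rw [loopA.eq_def]
      simp [scanF]
    | cons t rest =>
      have hrest : rest.length ≤ m := by simp at hlen; omega
      by_cases hF : t ∈ F
      · have hfc : List.filter (fun s => !F.contains s) (t :: rest)
            = rest.filter (fun s => !F.contains s) := by
          simp [hF]
        rw [hfc, ih rest F final hrest, scanF, if_pos hF]
      · have hfc : List.filter (fun s => !F.contains s) (t :: rest)
            = t :: rest.filter (fun s => !F.contains s) := by
          simp [hF]
        rw [hfc, List.reverse_cons]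
        rw [loopA.eq_def]
        have hne : (rest.filter (fun t => !F.contains t)).reverse ++ [t] ≠ [] := by simp
        rw [dif_pos hne]
        have hlastD : ((rest.filter (fun t => !F.contains t)).reverse ++ [t]).getLastD "" = t :=
          List.getLastD_concat
        simp only [hlastD]
        have hfilt : (((rest.filter (fun t => !F.contains t)).reverse ++ [t]).filter
              (fun s => !(subtermsOf t).contains s))
            = (rest.filter (fun s => !(F ++ subtermsOf t).contains s)).reverse := by
          rw [List.filter_append]
          have hself : (List.filter (fun s => !(subtermsOf t).contains s) [t]) = [] := by
            simp [self_mem_subterms t]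
          rw [hself, List.append_nil, List.filter_reverse, List.filter_filter]
          congr 1
          apply List.filter_congr
          intro x _
          rw [List.contains_append]
          cases h1 : (subtermsOf t).contains x <;> cases h2 : F.contains x <;> simp
        rw [hfilt, ih rest (F ++ subtermsOf t) (final ++ [t]) hrest]
        rw [scanF, if_neg hF, List.append_assoc]
        rfl

-- positional characterization of keepB over enumerate
-- member-wise Bool any congruence
theorem any_congr_mem {α : Type} (l : List α) (p q : α → Bool)
    (h : ∀ x ∈ l, p x = q x) : l.any p = l.any q := by
  induction l with
  | nil => rfl
  | cons a l ih =>
    simp only [List.any_cons, h a List.mem_cons_self,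
      ih (fun x hx => h x (List.mem_cons_of_mem _ hx))]

theorem keepB_pos : ∀ (terms : List String) (s : Int),
    keepB terms = (PySem.List.enumerate terms s).filterMap
      (fun p => if (PySem.List.enumerate terms s).any
          (fun q => decide (p.1 < q.1) && isSubterm p.2 q.2) then none else some p.2) := by
  intro terms
  induction terms with
  | nil => intro s; simp [keepB, PySem.List.enumerate_nil]
  | cons t rest ih =>
    intro s
    rw [PySem.List.enumerate_cons, keepB, List.filterMap_cons]
    have hhead : (((s, t) :: PySem.List.enumerate rest (s + 1)).any
        (fun q => decide ((s : Int) < q.1) && isSubterm t q.2))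
        = rest.any (fun u => isSubterm t u) := by
      rw [List.any_cons]
      have h0 : (decide ((s : Int) < s) && isSubterm t t) = false := by simp
      rw [h0, Bool.false_or]
      have h1 : (PySem.List.enumerate rest (s + 1)).any
          (fun q => decide ((s : Int) < q.1) && isSubterm t q.2)
          = (PySem.List.enumerate rest (s + 1)).any (fun q => isSubterm t q.2) := by
        apply any_congr_mem
        intro q hq
        rcases (PySem.List.mem_enumerate_iff _ _ _).mp hq with ⟨k, hk, rfl⟩
        have hlt : (s : Int) < s + 1 + (k : Int) := by omega
        simp [hlt]
      rw [h1]
      rw [show rest.any (fun u => isSubterm t u)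
          = (List.map (fun (q : Int × String) => q.2)
              (PySem.List.enumerate rest (s + 1))).any (fun u => isSubterm t u)
        from by rw [PySem.List.map_snd_enumerate]]
      rw [List.any_map]
      rfl
    have htail : List.filterMap
        (fun p => if (((s, t) :: PySem.List.enumerate rest (s + 1)).any
            (fun q => decide (p.1 < q.1) && isSubterm p.2 q.2)) then none else some p.2)
          (PySem.List.enumerate rest (s + 1))
        = List.filterMap
        (fun p => if ((PySem.List.enumerate rest (s + 1)).any
            (fun q => decide (p.1 < q.1) && isSubterm p.2 q.2)) then none else some p.2)
          (PySem.List.enumerate rest (s + 1)) := by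
      apply List.filterMap_congr
      intro p hp
      rcases (PySem.List.mem_enumerate_iff _ _ _).mp hp with ⟨k, hk, rfl⟩
      rw [List.any_cons]
      have hz : (decide ((s + 1 + (k : Int), rest[k]).1 < s)
          && isSubterm (s + 1 + (k : Int), rest[k]).2 t) = false := by
        have hns : ¬ (s + 1 + (k : Int) < s) := by omega
        simp [hns]
      rw [hz, Bool.false_or]
    simp only
    rw [hhead, htail, ← ih (s + 1)]
    by_cases h : rest.any (fun u => isSubterm t u) = true
    · rw [h]; simp
    · have hb : rest.any (fun u => isSubterm t u) = false := by
        rw [← Bool.not_eq_true]; exact h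
      rw [hb]; simp

-- proper subterms have strictly fewer components; equal component counts force equality
theorem subterm_cases (t u : String) : isSubterm t u = true ↔
    (t = "" ∨ u = t ∨ ((splitColon t).length < (splitColon u).length
      ∧ isSubseq (splitColon t) (splitColon u) = true)) := by
  rw [isSubterm_iff, mem_subtermsOf]
  constructor
  · rintro (rfl | hsub)
    · exact Or.inl rfl
    · by_cases hlen : (splitColon t).length = (splitColon u).length
      · have heq := hsub.eq_of_length hlen
        have hut : u = t := by
          have h1 := join_splitColon t
          rw [heq, join_splitColon u] at h1
          exact h1
        exact Or.inr (Or.inl hut)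
      · exact Or.inr (Or.inr ⟨lt_of_le_of_ne hsub.length_le hlen,
          (isSubseq_iff _ _).mpr hsub⟩)
  · rintro (rfl | rfl | ⟨_, hss⟩)
    · exact Or.inl rfl
    · exact Or.inr (List.Sublist.refl _)
    · exact Or.inr ((isSubseq_iff _ _).mp hss)

-- ---- proof-side mirrors of B's let-bound stages ----
def lastD (terms : List String) : PySem.Dict String Int :=
  (PySem.List.enumerate terms).foldl (fun d p => d.insert p.2 p.1) PySem.Dict.empty

def ksOf (terms : List String) : List String := (lastD terms).keys

def compsD (terms : List String) : PySem.Dict String (List String) :=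
  (ksOf terms).foldl (fun d t => d.insert t (splitColon t)) PySem.Dict.empty

def byLenD (terms : List String) : PySem.Dict Int (List String) :=
  (ksOf terms).foldl
    (fun d u => d.modify (((compsD terms).getD u []).length : Int) [] (· ++ [u]))
    PySem.Dict.empty

def thFun (terms : List String) (t : String) : Int :=
  let ct := (compsD terms).getD t []
  let th0 : Int := if t = "" then (terms.length : Int) - 1 else (lastD terms).getD t 0
  (byLenD terms).items.foldl (fun th pr =>
      if (ct.length : Int) < pr.1 then
        pr.2.foldl (fun th u =>
          if th < (lastD terms).getD u 0 && isSubseq ct ((compsD terms).getD u []) then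
            (lastD terms).getD u 0
          else th) th
      else th) th0

def thetaD (terms : List String) : PySem.Dict String Int :=
  (ksOf terms).foldl (fun d t => d.insert t (thFun terms t)) PySem.Dict.empty

theorem alt_eq (terms : List String) : remove_patsy_subterms_alt terms
    = (PySem.List.enumerate terms).filterMap
        (fun p => if (thetaD terms).getD p.2 0 ≤ p.1 then some p.2 else none) := rfl

-- ---- dictionary-stage facts ----
theorem ks_nodup (terms : List String) : (ksOf terms).Nodup := by
  unfold ksOf lastD
  exact PySem.Dict.nodup_keys_foldl_insert_key _ (fun (p : Int × String) => p.2)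
    (fun _ (p : Int × String) => p.1) _ (by simp [PySem.Dict.keys_empty])

theorem mem_ks (terms : List String) (u : String) : u ∈ ksOf terms ↔ u ∈ terms := by
  unfold ksOf lastD
  rw [PySem.Dict.keys_foldl_insert_key _ (fun (p : Int × String) => p.2)
    (fun _ (p : Int × String) => p.1)]
  rw [show List.map (fun (p : Int × String) => p.2) (PySem.List.enumerate terms 0) = terms
    from PySem.List.map_snd_enumerate terms 0]
  rw [PySem.Set.mem_update]
  simp [PySem.Dict.keys_empty]

theorem last_spec (terms : List String) : ∀ (u : String), u ∈ terms →
    ((lastD terms).getD u 0, u) ∈ PySem.List.enumerate terms 0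
    ∧ ∀ p ∈ PySem.List.enumerate terms 0, p.2 = u → p.1 ≤ (lastD terms).getD u 0 := by
  induction terms using List.reverseRecOn with
  | nil => intro u hu; simp at hu
  | append_singleton xs x ih =>
    intro u hu
    have henum : PySem.List.enumerate (xs ++ [x]) 0
        = PySem.List.enumerate xs 0 ++ [((0 + (xs.length : Int)), x)] := by
      rw [PySem.List.enumerate_append]
      rw [PySem.List.enumerate_cons, PySem.List.enumerate_nil]
    have hl : lastD (xs ++ [x]) = (lastD xs).insert x (0 + (xs.length : Int)) := by
      unfold lastD
      rw [henum, List.foldl_append]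
      simp
    by_cases hux : u = x
    · subst hux
      rw [hl, PySem.Dict.getD_insert_self]
      constructor
      · rw [henum]; exact List.mem_append_right _ (by simp)
      · intro p hp hpu
        rw [henum] at hp
        rcases List.mem_append.mp hp with hp | hp
        · rcases (PySem.List.mem_enumerate_iff _ _ _).mp hp with ⟨k, hk, rfl⟩
          simp only
          omega
        · simp only [List.mem_singleton] at hp
          rw [hp]
    · have hu' : u ∈ xs := by
        rcases List.mem_append.mp hu with h | h
        · exact h
        · simp only [List.mem_singleton] at h; exact absurd h hux
      rw [hl, PySem.Dict.getD_insert_of_ne _ _ _ hux]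
      obtain ⟨h1, h2⟩ := ih u hu'
      constructor
      · rw [henum]; exact List.mem_append_left _ h1
      · intro p hp hpu
        rw [henum] at hp
        rcases List.mem_append.mp hp with hp | hp
        · exact h2 p hp hpu
        · simp only [List.mem_singleton] at hp
          rw [hp] at hpu
          exact absurd (by simpa using hpu.symm) hux

theorem comps_getD (terms : List String) (t : String) (ht : t ∈ ksOf terms) :
    (compsD terms).getD t [] = splitColon t := by
  have hitems := PySem.Dict.items_foldl_insert_fresh (ksOf terms) (fun a => a) splitColon
    PySem.Dict.empty (by intro a _; simp [PySem.Dict.contains_empty])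
    (by simpa using ks_nodup terms)
  have hnd : (compsD terms).keys.Nodup := by
    unfold compsD
    exact PySem.Dict.nodup_keys_foldl_insert _ (fun _ t => splitColon t) _
      (by simp [PySem.Dict.keys_empty])
  have hmem : (t, splitColon t) ∈ (compsD terms).items := by
    unfold compsD
    rw [hitems]
    exact List.mem_append_right _ (List.mem_map_of_mem ht)
  exact PySem.Dict.getD_of_mem_items _ hmem hnd []

theorem theta_getD (terms : List String) (t : String) (ht : t ∈ ksOf terms) :
    (thetaD terms).getD t 0 = thFun terms t := by
  have hitems := PySem.Dict.items_foldl_insert_fresh (ksOf terms) (fun a => a) (thFun terms)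
    PySem.Dict.empty (by intro a _; simp [PySem.Dict.contains_empty])
    (by simpa using ks_nodup terms)
  have hnd : (thetaD terms).keys.Nodup := by
    unfold thetaD
    exact PySem.Dict.nodup_keys_foldl_insert _ (fun _ t => thFun terms t) _
      (by simp [PySem.Dict.keys_empty])
  have hmem : (t, thFun terms t) ∈ (thetaD terms).items := by
    unfold thetaD
    rw [hitems]
    exact List.mem_append_right _ (List.mem_map_of_mem ht)
  exact PySem.Dict.getD_of_mem_items _ hmem hnd 0

theorem byLen_getD (terms : List String) (c : Int) :
    (byLenD terms).getD c []
      = (ksOf terms).filter (fun u => (((splitColon u).length : Int) == c)) := by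
  unfold byLenD
  rw [show (ksOf terms).foldl
        (fun d u => d.modify (((compsD terms).getD u []).length : Int) [] (· ++ [u]))
        PySem.Dict.empty
      = ((ksOf terms).map
          (fun u => ((((compsD terms).getD u []).length : Int), u))).foldl
        (fun d p => d.modify p.1 [] (· ++ [p.2])) PySem.Dict.empty
    from Eq.symm (List.foldl_map (f := fun u => ((((compsD terms).getD u []).length : Int), u)) (g := fun (d : PySem.Dict Int (List String)) (p : Int × String) => d.modify p.1 [] (· ++ [p.2])))]
  rw [PySem.Dict.getD_foldl_modify_append]
  rw [List.filter_map, List.map_map]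
  simp only [PySem.Dict.getD_empty, List.nil_append, Function.comp_def, List.map_id']
  apply List.filter_congr
  intro u hu
  rw [comps_getD terms u hu]

theorem byLen_nodup_keys (terms : List String) : (byLenD terms).keys.Nodup := by
  unfold byLenD
  exact PySem.Dict.nodup_keys_foldl_modify_key _
    (fun u => (((compsD terms).getD u []).length : Int)) [] (fun _ u => (· ++ [u])) _
    (by simp [PySem.Dict.keys_empty])

theorem byLen_items_mem (terms : List String) (pr : Int × List String)
    (hpr : pr ∈ (byLenD terms).items) : pr.2 = (byLenD terms).getD pr.1 [] := by
  obtain ⟨c, us⟩ := pr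
  exact (PySem.Dict.getD_of_mem_items _ hpr (byLen_nodup_keys terms) []).symm

theorem byLen_keys_cover (terms : List String) (u : String) (hu : u ∈ ksOf terms) :
    ((splitColon u).length : Int) ∈ (byLenD terms).keys := by
  unfold byLenD
  rw [PySem.Dict.keys_foldl_modify_key _
    (fun u => (((compsD terms).getD u []).length : Int)) [] (fun _ u => (· ++ [u]))]
  rw [PySem.Set.mem_update]
  right
  rw [show ((splitColon u).length : Int) = (((compsD terms).getD u []).length : Int)
    from by rw [comps_getD terms u hu]]
  exact List.mem_map_of_mem hu

-- ---- max-accumulating fold facts ----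
theorem foldl_max_mono (g : String → Bool) (v : String → Int) :
    ∀ (us : List String) (th : Int),
    th ≤ us.foldl (fun th u => if th < v u && g u then v u else th) th := by
  intro us
  induction us with
  | nil => intro th; simp
  | cons u us ih =>
    intro th
    rw [List.foldl_cons]
    by_cases h : (th < v u && g u) = true
    · calc th ≤ v u := by
            rcases Bool.and_eq_true_iff.mp h with ⟨h1, _⟩
            exact le_of_lt (by exact_mod_cast of_decide_eq_true h1)
        _ ≤ _ := by rw [if_pos h]; exact ih (v u)
    · rw [if_neg h]; exact ih th

theorem foldl_max_ub (g : String → Bool) (v : String → Int) :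
    ∀ (us : List String) (th : Int) (u : String), u ∈ us → g u = true →
    v u ≤ us.foldl (fun th u => if th < v u && g u then v u else th) th := by
  intro us
  induction us with
  | nil => intro th u hu; simp at hu
  | cons w us ih =>
    intro th u hu hg
    rw [List.foldl_cons]
    rcases List.mem_cons.mp hu with rfl | hu
    · by_cases h : (th < v u && g u) = true
      · rw [if_pos h]; exact foldl_max_mono g v us (v u)
      · rw [if_neg h]
        have hnl : ¬ th < v u := by
          intro hlt
          exact h (Bool.and_eq_true_iff.mpr ⟨decide_eq_true hlt, hg⟩)
        exact le_trans (le_of_not_gt hnl) (foldl_max_mono g v us th)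
    · exact ih _ u hu hg

theorem foldl_max_cases (g : String → Bool) (v : String → Int) :
    ∀ (us : List String) (th : Int),
    us.foldl (fun th u => if th < v u && g u then v u else th) th = th
    ∨ ∃ u ∈ us, g u = true ∧
        us.foldl (fun th u => if th < v u && g u then v u else th) th = v u := by
  intro us
  induction us with
  | nil => intro th; left; simp
  | cons w us ih =>
    intro th
    rw [List.foldl_cons]
    by_cases h : (th < v w && g w) = true
    · rw [if_pos h]
      rcases ih (v w) with heq | ⟨u, hu, hg, heq⟩
      · exact Or.inr ⟨w, List.mem_cons_self, (Bool.and_eq_true_iff.mp h).2, heq⟩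
      · exact Or.inr ⟨u, List.mem_cons_of_mem _ hu, hg, heq⟩
    · rw [if_neg h]
      rcases ih th with heq | ⟨u, hu, hg, heq⟩
      · exact Or.inl heq
      · exact Or.inr ⟨u, List.mem_cons_of_mem _ hu, hg, heq⟩

-- ---- theta characterization ----
-- middle fold over by_len items
theorem itemsFold_mono (c : Int) (g : String → Bool) (v : String → Int) :
    ∀ (L : List (Int × List String)) (th : Int),
    th ≤ L.foldl (fun th pr => if c < pr.1 then
        pr.2.foldl (fun th u => if th < v u && g u then v u else th) th else th) th := by
  intro L
  induction L with
  | nil => intro th; simp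
  | cons pr L ih =>
    intro th
    rw [List.foldl_cons]
    by_cases h : c < pr.1
    · rw [if_pos h]
      exact le_trans (foldl_max_mono g v pr.2 th) (ih _)
    · rw [if_neg h]; exact ih th

theorem itemsFold_ub (c : Int) (g : String → Bool) (v : String → Int) :
    ∀ (L : List (Int × List String)) (th : Int) (pr : Int × List String),
    pr ∈ L → c < pr.1 → ∀ u ∈ pr.2, g u = true →
    v u ≤ L.foldl (fun th pr => if c < pr.1 then
        pr.2.foldl (fun th u => if th < v u && g u then v u else th) th else th) th := by
  intro L
  induction L with
  | nil => intro th pr hpr; simp at hpr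
  | cons pr0 L ih =>
    intro th pr hpr hc u hu hg
    rw [List.foldl_cons]
    rcases List.mem_cons.mp hpr with rfl | hpr
    · rw [if_pos hc]
      exact le_trans (foldl_max_ub g v pr.2 th u hu hg) (itemsFold_mono c g v L _)
    · exact ih _ pr hpr hc u hu hg

theorem itemsFold_cases (c : Int) (g : String → Bool) (v : String → Int) :
    ∀ (L : List (Int × List String)) (th : Int),
    L.foldl (fun th pr => if c < pr.1 then
        pr.2.foldl (fun th u => if th < v u && g u then v u else th) th else th) th = th
    ∨ ∃ pr ∈ L, c < pr.1 ∧ ∃ u ∈ pr.2, g u = true ∧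
      L.foldl (fun th pr => if c < pr.1 then
        pr.2.foldl (fun th u => if th < v u && g u then v u else th) th else th) th = v u := by
  intro L
  induction L with
  | nil => intro th; left; simp
  | cons pr0 L ih =>
    intro th
    rw [List.foldl_cons]
    by_cases h : c < pr0.1
    · rw [if_pos h]
      rcases foldl_max_cases g v pr0.2 th with heq | ⟨u, hu, hg, heq⟩
      · rw [heq]
        rcases ih th with h2 | ⟨pr, hpr, hc, u, hu, hg, h2⟩
        · exact Or.inl h2
        · exact Or.inr ⟨pr, List.mem_cons_of_mem _ hpr, hc, u, hu, hg, h2⟩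
      · rcases ih (pr0.2.foldl (fun th u => if th < v u && g u then v u else th) th)
          with h2 | ⟨pr, hpr, hc, w, hw, hgw, h2⟩
        · exact Or.inr ⟨pr0, List.mem_cons_self, h, u, hu, hg, h2.trans heq⟩
        · exact Or.inr ⟨pr, List.mem_cons_of_mem _ hpr, hc, w, hw, hgw, h2⟩
    · rw [if_neg h]
      rcases ih th with h2 | ⟨pr, hpr, hc, u, hu, hg, h2⟩
      · exact Or.inl h2
      · exact Or.inr ⟨pr, List.mem_cons_of_mem _ hpr, hc, u, hu, hg, h2⟩

theorem thFun_ub (terms : List String) (t : String) (ht : t ∈ terms) :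
    ∀ p ∈ PySem.List.enumerate terms 0, isSubterm t p.2 = true → p.1 ≤ thFun terms t := by
  intro p hp hsub
  have htk : t ∈ ksOf terms := (mem_ks terms t).mpr ht
  have hct : (compsD terms).getD t [] = splitColon t := comps_getD terms t htk
  rcases (PySem.List.mem_enumerate_iff _ _ _).mp hp with ⟨k, hk, rfl⟩
  simp only
  have hmono := itemsFold_mono ((((compsD terms).getD t []).length : Int))
    (fun u => isSubseq ((compsD terms).getD t []) ((compsD terms).getD u []))
    (fun u => (lastD terms).getD u 0) (byLenD terms).items
    (if t = "" then (terms.length : Int) - 1 else (lastD terms).getD t 0)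
  rcases (subterm_cases t terms[k]).mp hsub with rfl | hut | ⟨hlen, hss⟩
  · refine le_trans ?_ hmono
    rw [if_pos rfl]
    omega
  · have hlast := (last_spec terms t ht).2 (0 + (k : Int), terms[k])
      ((PySem.List.mem_enumerate_iff _ _ _).mpr ⟨k, hk, rfl⟩) hut
    refine le_trans hlast (le_trans ?_ hmono)
    by_cases he : t = ""
    · subst he
      have hb := (last_spec terms "" ht).1
      rcases (PySem.List.mem_enumerate_iff _ _ _).mp hb with ⟨k', hk', hpk⟩
      have hfst : (lastD terms).getD "" 0 = 0 + (k' : Int) := congrArg Prod.fst hpk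
      rw [if_pos rfl, hfst]
      omega
    · rw [if_neg he]
  · have hu : terms[k] ∈ terms := List.getElem_mem hk
    have huk : terms[k] ∈ ksOf terms := (mem_ks terms terms[k]).mpr hu
    have hcu : (compsD terms).getD terms[k] [] = splitColon terms[k] :=
      comps_getD terms terms[k] huk
    have hkey : ((splitColon terms[k]).length : Int) ∈ (byLenD terms).keys :=
      byLen_keys_cover terms terms[k] huk
    have hitem : (((splitColon terms[k]).length : Int),
        (byLenD terms).getD (((splitColon terms[k]).length : Int)) [])
        ∈ (byLenD terms).items := by
      rw [PySem.Dict.items_eq_map_keys (byLenD terms) (byLen_nodup_keys terms) []]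
      exact List.mem_map_of_mem hkey
    have humem : terms[k]
        ∈ (byLenD terms).getD (((splitColon terms[k]).length : Int)) [] := by
      rw [byLen_getD]
      exact List.mem_filter.mpr ⟨huk, by simp⟩
    have hlast := (last_spec terms terms[k] hu).2 (0 + (k : Int), terms[k])
      ((PySem.List.mem_enumerate_iff _ _ _).mpr ⟨k, hk, rfl⟩) rfl
    refine le_trans hlast ?_
    exact itemsFold_ub _ _ _ (byLenD terms).items _ _ hitem
      (by simp only [hct]; exact_mod_cast hlen) terms[k] humem
      (by simp only [hct, hcu]; exact hss)

theorem thFun_mem (terms : List String) (t : String) (ht : t ∈ terms) :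
    ∃ p ∈ PySem.List.enumerate terms 0, isSubterm t p.2 = true ∧ thFun terms t ≤ p.1 := by
  have htk : t ∈ ksOf terms := (mem_ks terms t).mpr ht
  have hct : (compsD terms).getD t [] = splitColon t := comps_getD terms t htk
  have hcases := itemsFold_cases ((((compsD terms).getD t []).length : Int))
    (fun u => isSubseq ((compsD terms).getD t []) ((compsD terms).getD u []))
    (fun u => (lastD terms).getD u 0) (byLenD terms).items
    (if t = "" then (terms.length : Int) - 1 else (lastD terms).getD t 0)
  rcases hcases with heq | ⟨pr, hpr, hc, u, hu, hg, heq⟩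
  · by_cases he : t = ""
    · subst he
      have hne : terms ≠ [] := List.ne_nil_of_mem ht
      have hlen : 0 < terms.length := List.length_pos_of_ne_nil hne
      refine ⟨(0 + ((terms.length - 1 : Nat) : Int), terms[terms.length - 1]),
        (PySem.List.mem_enumerate_iff _ _ _).mpr ⟨terms.length - 1, by omega, rfl⟩, ?_, ?_⟩
      · simp [isSubterm]
      · show thFun terms "" ≤ _
        rw [show thFun terms "" = (byLenD terms).items.foldl _ _ from rfl, heq, if_pos rfl]
        push_cast [Nat.cast_sub (by omega : 1 ≤ terms.length)]
        omega
    · refine ⟨((lastD terms).getD t 0, t), (last_spec terms t ht).1, isSubterm_refl t, ?_⟩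
      show thFun terms t ≤ _
      rw [show thFun terms t = (byLenD terms).items.foldl _ _ from rfl, heq, if_neg he]
  · have hpr2 := byLen_items_mem terms pr hpr
    rw [hpr2, byLen_getD] at hu
    rcases List.mem_filter.mp hu with ⟨huk, hul⟩
    have hu' : u ∈ terms := (mem_ks terms u).mp huk
    have hcu : (compsD terms).getD u [] = splitColon u := comps_getD terms u huk
    refine ⟨((lastD terms).getD u 0, u), (last_spec terms u hu').1, ?_, ?_⟩
    · rw [subterm_cases]
      refine Or.inr (Or.inr ⟨?_, ?_⟩)
      · have hle : (((splitColon u).length : Int)) = pr.1 := by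
          simpa using hul
        rw [hct] at hc
        have hlt : ((splitColon t).length : Int) < ((splitColon u).length : Int) := by
          rw [hle]; exact_mod_cast hc
        exact_mod_cast hlt
      · rw [hct, hcu] at hg
        exact hg
    · show thFun terms t ≤ _
      rw [show thFun terms t = (byLenD terms).items.foldl _ _ from rfl, heq]

-- ===== VERDICT (by name: the statement is the Claim_ definition above) =====
theorem remove_patsy_subterms_spec : Claim_equal_remove_patsy_subterms := by
  intro terms _
  show remove_patsy_subterms terms = remove_patsy_subterms_alt terms
  unfold remove_patsy_subterms
  have hA : loopA terms [] = scanF terms.reverse [] := by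
    have h := loopA_eq_scan terms.reverse.length terms.reverse [] [] (le_refl _)
    simpa using h
  rw [hA, scanF_eq_scanH _ [] [] (by simp), scanH_eq_scanA _ [] [] (by simp) (by simp),
    ← keepB_eq_scanA, alt_eq, keepB_pos terms 0]
  apply List.filterMap_congr
  intro p hp
  have hmemt : p.2 ∈ terms := by
    rcases (PySem.List.mem_enumerate_iff _ _ _).mp hp with ⟨k, hk, rfl⟩
    exact List.getElem_mem hk
  have hθ : (thetaD terms).getD p.2 0 = thFun terms p.2 :=
    theta_getD terms p.2 ((mem_ks terms p.2).mpr hmemt)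
  by_cases hany : ((PySem.List.enumerate terms 0).any
      (fun q => decide (p.1 < q.1) && isSubterm p.2 q.2)) = true
  · rcases List.any_eq_true.mp hany with ⟨q, hq, hqq⟩
    rcases Bool.and_eq_true_iff.mp hqq with ⟨hlt, hsub⟩
    have hub := thFun_ub terms p.2 hmemt q hq hsub
    have hlt' : p.1 < q.1 := of_decide_eq_true hlt
    rw [hany, if_pos rfl, hθ, if_neg (by omega)]
  · have hb : ((PySem.List.enumerate terms 0).any
        (fun q => decide (p.1 < q.1) && isSubterm p.2 q.2)) = false := by
      rw [← Bool.not_eq_true]; exact hany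
    rcases thFun_mem terms p.2 hmemt with ⟨q, hq, hsub, hth⟩
    have hq1 : ¬ p.1 < q.1 := by
      intro hlt
      rw [List.any_eq_true] at hany
      exact hany ⟨q, hq, Bool.and_eq_true_iff.mpr ⟨decide_eq_true hlt, hsub⟩⟩
    rw [hb, hθ]
    simp only [Bool.false_eq_true, if_false]
    rw [if_pos (by omega)]
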